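-- pv_equiv track=rewrite | github.com/element-code/hll-language-skill-check | src/checker.py | normalize_german_text
-- ===== SOURCE A (Python) =====
-- import unicodedata
--
-- def normalize_german_text(text: str) -> str:
--     """Normalize German text for comparison, handling umlauts and their ASCII equivalents."""
--     # First normalize Unicode to NFC form
--     text = unicodedata.normalize('NFC', text).lower()
--
--     # Replace ASCII equivalents with umlauts
--     replacements = {
--         'ue': 'ü',
--         'ae': 'ä',
--         'oe': 'ö',
--         'ss': 'ß'
--     }
--
--     for ascii_form, umlaut in replacements.items():
--         text = text.replace(ascii_form, umlaut)
--
--     return text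
-- ===== SOURCE B (Python) =====
-- import unicodedata
--
-- def normalize_german_text(text: str) -> str:
--     """Normalize German text for comparison, handling umlauts and their ASCII equivalents."""
--     text = unicodedata.normalize('NFC', text).lower()
--     pairs = {'ue': 'ü', 'ae': 'ä', 'oe': 'ö', 'ss': 'ß'}
--     out = []
--     i = 0
--     n = len(text)
--     while i < n:
--         rep = pairs.get(text[i:i + 2])
--         if rep is not None:
--             out.append(rep)
--             i += 2
--         else:
--             out.append(text[i])
--             i += 1
--     return ''.join(out)
-- ===== Notes on version B (the rewrite author's own statement) =====
-- stated objective: alternative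
-- what changed: Replaced A's four sequential whole-string str.replace passes with a single greedy left-to-right scan that inspects a two-character window and emits the umlaut (advancing by 2) or the current character (advancing by 1).
import Mathlib
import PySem

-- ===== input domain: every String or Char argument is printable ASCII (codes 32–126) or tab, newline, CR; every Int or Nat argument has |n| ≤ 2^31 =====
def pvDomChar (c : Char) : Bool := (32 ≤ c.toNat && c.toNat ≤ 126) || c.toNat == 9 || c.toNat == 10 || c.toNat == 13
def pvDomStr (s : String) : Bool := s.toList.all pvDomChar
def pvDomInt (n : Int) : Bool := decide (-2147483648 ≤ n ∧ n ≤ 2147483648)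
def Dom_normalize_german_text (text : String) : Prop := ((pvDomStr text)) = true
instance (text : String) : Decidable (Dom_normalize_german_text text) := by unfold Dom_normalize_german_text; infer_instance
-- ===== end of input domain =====

-- B replaces A's four sequential whole-string `replace` passes by one greedy left-to-right
-- two-character-window scan (objective: alternative decomposition, one traversal).

-- ===== PORT A =====
-- unicodedata.normalize('NFC', ·) is the identity on the ASCII input domain, ported as such (exact there).
def normalize_german_text (text : String) : String :=
  let t0 := PySem.Str.lower text
  let t1 := PySem.Str.replace t0 "ue" "ü"
  let t2 := PySem.Str.replace t1 "ae" "ä"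
  let t3 := PySem.Str.replace t2 "oe" "ö"
  PySem.Str.replace t3 "ss" "ß"

-- ===== PORT B =====
-- the greedy scan of Source B: look at the 2-char window, emit the umlaut and skip 2, else emit 1 char
def scanGerman : List Char → List Char
  | a :: b :: t =>
    if a = 'u' ∧ b = 'e' then 'ü' :: scanGerman t
    else if a = 'a' ∧ b = 'e' then 'ä' :: scanGerman t
    else if a = 'o' ∧ b = 'e' then 'ö' :: scanGerman t
    else if a = 's' ∧ b = 's' then 'ß' :: scanGerman t
    else a :: scanGerman (b :: t)
  | l => l

def normalize_german_text_alt (text : String) : String :=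
  -- unicodedata.normalize('NFC', ·) is the identity on the ASCII input domain, ported as such (exact there).
  String.ofList (scanGerman (PySem.Chars.lower text.toList))

-- ===== PRECONDITION & SPEC =====
def Spec_normalize_german_text (text : String) (out : String) : Prop := out = normalize_german_text_alt text
instance (text : String) (out : String) : Decidable (Spec_normalize_german_text text out) := by unfold Spec_normalize_german_text; infer_instance

-- ===== CLAIM (what is proved, stated in full; the proofs are below) =====
def Claim_equal_normalize_german_text : Prop := ∀ (text : String), Dom_normalize_german_text text → Spec_normalize_german_text text (normalize_german_text text)

-- ===== LEMMAS AND PROOFS =====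

-- structural characterisation of one str.replace pass with a 2-char pattern [p,q] and 1-char replacement [r]
def rep2 (p q r : Char) : List Char → List Char
  | a :: b :: t => if a = p ∧ b = q then r :: rep2 p q r t else a :: rep2 p q r (b :: t)
  | l => l

theorem rep2_skip1 (p q r c : Char) (X : List Char) (hc : c ≠ p) :
    rep2 p q r (c :: X) = c :: rep2 p q r X := by
  match X with
  | [] => rfl
  | b :: t =>
    have e : rep2 p q r (c :: b :: t)
        = if c = p ∧ b = q then r :: rep2 p q r t else c :: rep2 p q r (b :: t) := rfl
    rw [e, if_neg (fun h => hc h.1)]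

theorem rep2_skip2 (p q r : Char) (X : List Char) (hX : X.head? ≠ some q) :
    rep2 p q r (p :: X) = p :: rep2 p q r X := by
  match X with
  | [] => rfl
  | b :: t =>
    have hb : b ≠ q := by simpa using hX
    have e : rep2 p q r (p :: b :: t)
        = if p = p ∧ b = q then r :: rep2 p q r t else p :: rep2 p q r (b :: t) := rfl
    rw [e, if_neg (fun h => hb h.2)]

theorem rep2_match (p q r : Char) (X : List Char) :
    rep2 p q r (p :: q :: X) = r :: rep2 p q r X := by
  have e : rep2 p q r (p :: q :: X)
      = if p = p ∧ q = q then r :: rep2 p q r X else p :: rep2 p q r (q :: X) := rfl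
  rw [e, if_pos ⟨rfl, rfl⟩]

-- head of a replace pass on a nonempty list: the old head, or the replacement char
theorem rep2_head (p q r c : Char) (X : List Char) :
    ∃ h t', rep2 p q r (c :: X) = h :: t' ∧ (h = c ∨ h = r) := by
  match X with
  | [] => exact ⟨c, [], rfl, Or.inl rfl⟩
  | b :: t =>
    by_cases hm : c = p ∧ b = q
    · obtain ⟨rfl, rfl⟩ := hm
      exact ⟨r, _, rep2_match _ _ _ _, Or.inr rfl⟩
    · have e : rep2 p q r (c :: b :: t)
          = if c = p ∧ b = q then r :: rep2 p q r t else c :: rep2 p q r (b :: t) := rfl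
      exact ⟨c, rep2 p q r (b :: t), by rw [e, if_neg hm], Or.inl rfl⟩

theorem go_eq_rep2 (p q r : Char) :
    ∀ (fuel : Nat) (l acc : List Char), l.length ≤ fuel →
      PySem.Chars.replace.go [p, q] [r] fuel l acc = acc.reverse ++ rep2 p q r l := by
  intro fuel
  induction fuel with
  | zero =>
    intro l acc h
    have : l = [] := List.length_eq_zero_iff.mp (Nat.le_zero.mp h)
    subst this
    simp [PySem.Chars.replace.go, rep2]
  | succ n ih =>
    intro l acc h
    match l with
    | [] => simp [PySem.Chars.replace.go, rep2]
    | [c] =>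
      have hpf : [p, q].isPrefixOf [c] = false := by simp [List.isPrefixOf]
      rw [PySem.Chars.replace.go]
      simp only [hpf, Bool.false_eq_true, if_false]
      rw [ih [] (c :: acc) (by simp)]
      simp [rep2]
    | c :: b :: t =>
      rw [PySem.Chars.replace.go]
      by_cases hm : c = p ∧ b = q
      · obtain ⟨rfl, rfl⟩ := hm
        have hpf : [c, b].isPrefixOf (c :: b :: t) = true := by simp [List.isPrefixOf]
        simp only [hpf, if_true]
        rw [show List.drop [c, b].length (c :: b :: t) = t from rfl]
        rw [ih t ([r].reverse ++ acc) (by simp at h ⊢; omega)]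
        rw [rep2_match]
        simp
      · have hpf : [p, q].isPrefixOf (c :: b :: t) = false := by
          simp [List.isPrefixOf]
          intro h1 h2; exact hm ⟨h1.symm, h2.symm⟩
        simp only [hpf, Bool.false_eq_true, if_false]
        rw [ih (b :: t) (c :: acc) (by simp at h ⊢; omega)]
        have e : rep2 p q r (c :: b :: t)
            = if c = p ∧ b = q then r :: rep2 p q r t else c :: rep2 p q r (b :: t) := rfl
        rw [e, if_neg hm]
        simp

theorem replace_eq_rep2 (p q r : Char) (s : List Char) :
    PySem.Chars.replace s [p, q] [r] = rep2 p q r s := by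
  rw [PySem.Chars.replace]
  simp only [List.isEmpty_cons, Bool.false_eq_true, if_false]
  exact go_eq_rep2 p q r s.length s [] le_rfl

-- abbreviation for A's four sequential passes
def fourPass (L : List Char) : List Char :=
  rep2 's' 's' 'ß' (rep2 'o' 'e' 'ö' (rep2 'a' 'e' 'ä' (rep2 'u' 'e' 'ü' L)))

theorem fourPass_eq_scan : ∀ (n : Nat) (L : List Char), L.length ≤ n → fourPass L = scanGerman L := by
  intro n
  induction n with
  | zero =>
    intro L h
    have : L = [] := List.length_eq_zero_iff.mp (Nat.le_zero.mp h)
    subst this; rfl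
  | succ n ih =>
    intro L h
    match L with
    | [] => rfl
    | [a] => simp [fourPass, rep2, scanGerman]
    | a :: b :: t =>
      have ht : t.length ≤ n := by simp at h; omega
      have hbt : (b :: t).length ≤ n := by simp at h ⊢; omega
      by_cases hue : a = 'u' ∧ b = 'e'
      · obtain ⟨rfl, rfl⟩ := hue
        unfold fourPass
        rw [rep2_match 'u' 'e' 'ü' t,
          rep2_skip1 'a' 'e' 'ä' 'ü' _ (by decide),
          rep2_skip1 'o' 'e' 'ö' 'ü' _ (by decide),
          rep2_skip1 's' 's' 'ß' 'ü' _ (by decide)]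
        rw [show rep2 's' 's' 'ß' (rep2 'o' 'e' 'ö' (rep2 'a' 'e' 'ä' (rep2 'u' 'e' 'ü' t))) = fourPass t from rfl,
          ih t ht]
        simp [scanGerman]
      · by_cases hae : a = 'a' ∧ b = 'e'
        · obtain ⟨rfl, rfl⟩ := hae
          unfold fourPass
          rw [rep2_skip1 'u' 'e' 'ü' 'a' _ (by decide),
            rep2_skip1 'u' 'e' 'ü' 'e' _ (by decide),
            rep2_match 'a' 'e' 'ä' _,
            rep2_skip1 'o' 'e' 'ö' 'ä' _ (by decide),
            rep2_skip1 's' 's' 'ß' 'ä' _ (by decide)]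
          rw [show rep2 's' 's' 'ß' (rep2 'o' 'e' 'ö' (rep2 'a' 'e' 'ä' (rep2 'u' 'e' 'ü' t))) = fourPass t from rfl,
          ih t ht]
          simp [scanGerman]
        · by_cases hoe : a = 'o' ∧ b = 'e'
          · obtain ⟨rfl, rfl⟩ := hoe
            unfold fourPass
            rw [rep2_skip1 'u' 'e' 'ü' 'o' _ (by decide),
              rep2_skip1 'u' 'e' 'ü' 'e' _ (by decide),
              rep2_skip1 'a' 'e' 'ä' 'o' _ (by decide),
              rep2_skip1 'a' 'e' 'ä' 'e' _ (by decide),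
              rep2_match 'o' 'e' 'ö' _,
              rep2_skip1 's' 's' 'ß' 'ö' _ (by decide)]
            rw [show rep2 's' 's' 'ß' (rep2 'o' 'e' 'ö' (rep2 'a' 'e' 'ä' (rep2 'u' 'e' 'ü' t))) = fourPass t from rfl,
          ih t ht]
            simp [scanGerman]
          · by_cases hss : a = 's' ∧ b = 's'
            · obtain ⟨rfl, rfl⟩ := hss
              unfold fourPass
              rw [rep2_skip1 'u' 'e' 'ü' 's' _ (by decide),
                rep2_skip1 'u' 'e' 'ü' 's' _ (by decide),
                rep2_skip1 'a' 'e' 'ä' 's' _ (by decide),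
                rep2_skip1 'a' 'e' 'ä' 's' _ (by decide),
                rep2_skip1 'o' 'e' 'ö' 's' _ (by decide),
                rep2_skip1 'o' 'e' 'ö' 's' _ (by decide),
                rep2_match 's' 's' 'ß' (rep2 'o' 'e' 'ö' (rep2 'a' 'e' 'ä' (rep2 'u' 'e' 'ü' t)))]
              rw [show rep2 's' 's' 'ß' (rep2 'o' 'e' 'ö' (rep2 'a' 'e' 'ä' (rep2 'u' 'e' 'ü' t))) = fourPass t from rfl,
          ih t ht]
              simp [scanGerman]
            · -- no match at a: a passes through all four passes, and the scan advances by one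
              obtain ⟨h1, t1, he1, hh1⟩ := rep2_head 'u' 'e' 'ü' b t
              obtain ⟨h2, t2, he2, hh2⟩ := rep2_head 'a' 'e' 'ä' h1 t1
              obtain ⟨h3, t3, he3, hh3⟩ := rep2_head 'o' 'e' 'ö' h2 t2
              rw [← he1] at he2
              rw [← he2] at he3
              have s1 : rep2 'u' 'e' 'ü' (a :: b :: t) = a :: rep2 'u' 'e' 'ü' (b :: t) := by
                by_cases hau : a = 'u'
                · subst hau
                  refine rep2_skip2 _ _ _ _ ?_
                  simp only [List.head?_cons, ne_eq, Option.some.injEq]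
                  exact fun hb => hue ⟨rfl, hb⟩
                · exact rep2_skip1 _ _ _ _ _ hau
              have s2 : rep2 'a' 'e' 'ä' (a :: rep2 'u' 'e' 'ü' (b :: t))
                  = a :: rep2 'a' 'e' 'ä' (rep2 'u' 'e' 'ü' (b :: t)) := by
                by_cases haa : a = 'a'
                · subst haa
                  refine rep2_skip2 _ _ _ _ ?_
                  rw [he1]
                  simp only [List.head?_cons, ne_eq, Option.some.injEq]
                  intro hq
                  rcases hh1 with rfl | rfl
                  · exact hae ⟨rfl, hq⟩
                  · exact absurd hq (by decide)
                · exact rep2_skip1 _ _ _ _ _ haa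
              have s3 : rep2 'o' 'e' 'ö' (a :: rep2 'a' 'e' 'ä' (rep2 'u' 'e' 'ü' (b :: t)))
                  = a :: rep2 'o' 'e' 'ö' (rep2 'a' 'e' 'ä' (rep2 'u' 'e' 'ü' (b :: t))) := by
                by_cases hao : a = 'o'
                · subst hao
                  refine rep2_skip2 _ _ _ _ ?_
                  rw [he2]
                  simp only [List.head?_cons, ne_eq, Option.some.injEq]
                  intro hq
                  rcases hh2 with rfl | rfl
                  · rcases hh1 with rfl | rfl
                    · exact hoe ⟨rfl, hq⟩
                    · exact absurd hq (by decide)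
                  · exact absurd hq (by decide)
                · exact rep2_skip1 _ _ _ _ _ hao
              have s4 : rep2 's' 's' 'ß' (a :: rep2 'o' 'e' 'ö' (rep2 'a' 'e' 'ä' (rep2 'u' 'e' 'ü' (b :: t))))
                  = a :: rep2 's' 's' 'ß' (rep2 'o' 'e' 'ö' (rep2 'a' 'e' 'ä' (rep2 'u' 'e' 'ü' (b :: t)))) := by
                by_cases has : a = 's'
                · subst has
                  refine rep2_skip2 _ _ _ _ ?_
                  rw [he3]
                  simp only [List.head?_cons, ne_eq, Option.some.injEq]
                  intro hq
                  rcases hh3 with rfl | rfl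
                  · rcases hh2 with rfl | rfl
                    · rcases hh1 with rfl | rfl
                      · exact hss ⟨rfl, hq⟩
                      · exact absurd hq (by decide)
                    · exact absurd hq (by decide)
                  · exact absurd hq (by decide)
                · exact rep2_skip1 _ _ _ _ _ has
              unfold fourPass
              rw [s1, s2, s3, s4, show rep2 's' 's' 'ß' (rep2 'o' 'e' 'ö' (rep2 'a' 'e' 'ä' (rep2 'u' 'e' 'ü' (b :: t)))) = fourPass (b :: t) from rfl, ih (b :: t) hbt]
              have esc : scanGerman (a :: b :: t)
                  = if a = 'u' ∧ b = 'e' then 'ü' :: scanGerman t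
                    else if a = 'a' ∧ b = 'e' then 'ä' :: scanGerman t
                    else if a = 'o' ∧ b = 'e' then 'ö' :: scanGerman t
                    else if a = 's' ∧ b = 's' then 'ß' :: scanGerman t
                    else a :: scanGerman (b :: t) := rfl
              rw [esc, if_neg hue, if_neg hae, if_neg hoe, if_neg hss]

-- ===== VERDICT (by name: the statement is the Claim_ definition above) =====
theorem normalize_german_text_spec : Claim_equal_normalize_german_text := by
  intro text _
  unfold Spec_normalize_german_text normalize_german_text normalize_german_text_alt
  apply String.toList_injective   -- compare the two strings on their character lists
  simp only [PySem.Str.toList_replace, PySem.Str.toList_lower, String.toList_ofList]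
  rw [show ("ue" : String).toList = ['u', 'e'] from rfl, show ("ü" : String).toList = ['ü'] from rfl,
    show ("ae" : String).toList = ['a', 'e'] from rfl, show ("ä" : String).toList = ['ä'] from rfl,
    show ("oe" : String).toList = ['o', 'e'] from rfl, show ("ö" : String).toList = ['ö'] from rfl,
    show ("ss" : String).toList = ['s', 's'] from rfl, show ("ß" : String).toList = ['ß'] from rfl]
  rw [replace_eq_rep2, replace_eq_rep2, replace_eq_rep2, replace_eq_rep2]
  exact fourPass_eq_scan _ _ le_rfl
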